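-- pv_equiv track=rewrite | github.com/posl/comment_recommendation | script/mod_gen/4_time/zh/258_D/0.py | solve
-- ===== SOURCE A (Python) =====
-- def solve(n, x, ab):
--     a = []
--     b = []
--     for i in range(n):
--         a.append(ab[i][0])
--         b.append(ab[i][1])
--     s = sum(a)
--     t = sum(b)
--     c = [2 * a[i] + b[i] for i in range(n)]
--     c.sort()
--     if s <= x:
--         return n * (s + t)
--     else:
--         i = 0
--         while i < n:
--             if c[i] > x:
--                 break
--             i += 1
--         if i == n:
--             return (n - 1) * x + t
--         else:
--             return i * x + (n - i) * (x + t)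
-- ===== SOURCE B (Python) =====
-- def solve(n, x, ab):
--     # Staged comprehensions: materialise the prefix, filter the "heavy" points
--     # (2*a+b > x) and use the algebraically simplified result n*x + (n-light)*t.
--     pts = [ab[k] for k in range(n)]
--     s = sum(a for a, _ in pts)
--     t = sum(b for _, b in pts)
--     if s <= x:
--         return n * (s + t)
--     heavy = [p for p in pts if 2 * p[0] + p[1] > x]
--     light = len(pts) - len(heavy)
--     if light == n:
--         return (n - 1) * x + t
--     return n * x + (n - light) * t
-- ===== Notes on version B (the rewrite author's own statement) =====
-- stated objective: simpler
-- what changed: B drops A's sort-and-scan entirely: it materialises the points, filters out the heavy ones (2*a+b > x) with a comprehension, and returns the algebraically simplified closed form n*x + (n-light)*t instead of A's index-scan over a sorted threshold list.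
import Mathlib
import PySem

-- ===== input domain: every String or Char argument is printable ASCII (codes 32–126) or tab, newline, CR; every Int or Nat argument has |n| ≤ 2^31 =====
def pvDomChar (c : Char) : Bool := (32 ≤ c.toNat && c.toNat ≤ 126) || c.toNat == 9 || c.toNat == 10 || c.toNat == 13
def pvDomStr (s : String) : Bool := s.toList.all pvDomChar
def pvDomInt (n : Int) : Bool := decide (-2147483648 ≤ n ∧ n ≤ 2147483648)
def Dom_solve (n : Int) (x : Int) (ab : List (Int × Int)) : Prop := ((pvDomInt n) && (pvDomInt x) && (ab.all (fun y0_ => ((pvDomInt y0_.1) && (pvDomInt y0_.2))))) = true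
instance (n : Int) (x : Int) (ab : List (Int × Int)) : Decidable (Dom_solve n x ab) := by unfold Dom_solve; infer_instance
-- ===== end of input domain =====

-- B drops A's sort-and-scan: it filters the heavy points (2*a+b > x) and uses the
-- algebraically simplified closed form n*x + (n-light)*t.

-- ===== PORT A =====
-- the 'while i < n: if c[i] > x: break; i += 1' loop of A
def solveLoopA (c : List Int) (x : Int) (n : Int) (i : Int) : Int :=
  if _h : i < n then
    if PySem.List.pyGetD c i 0 > x then i
    else solveLoopA c x n (i + 1)
  else i
termination_by (n - i).toNat
decreasing_by omega

def solve (n : Int) (x : Int) (ab : List (Int × Int)) : Int :=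
  let a := (PySem.List.pyRange 0 n 1).foldl
    (fun acc i => acc ++ [(PySem.List.pyGetD ab i (0, 0)).1]) []
  let b := (PySem.List.pyRange 0 n 1).foldl
    (fun acc i => acc ++ [(PySem.List.pyGetD ab i (0, 0)).2]) []
  let s := a.sum
  let t := b.sum
  let c := (PySem.List.pyRange 0 n 1).map
    (fun i => 2 * PySem.List.pyGetD a i 0 + PySem.List.pyGetD b i 0)
  let c := PySem.List.sorted c (fun v => v) false
  if s ≤ x then n * (s + t)
  else
    let i := solveLoopA c x n 0
    if i = n then (n - 1) * x + t
    else i * x + (n - i) * (x + t)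

-- ===== PORT B =====
def solve_alt (n : Int) (x : Int) (ab : List (Int × Int)) : Int :=
  let pts := (PySem.List.pyRange 0 n 1).map (fun k => PySem.List.pyGetD ab k (0, 0))
  let s := (pts.map (fun p => p.1)).sum
  let t := (pts.map (fun p => p.2)).sum
  if s ≤ x then n * (s + t)
  else
    let heavy := pts.filter (fun p => 2 * p.1 + p.2 > x)
    let light : Int := (pts.length : Int) - (heavy.length : Int)
    if light = n then (n - 1) * x + t
    else n * x + (n - light) * t

-- ===== PRECONDITION & SPEC =====
-- Pre_ excludes exactly the inputs where both A and B raise IndexError (ab[k] with n > len(ab)).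
def Pre_solve (n : Int) (x : Int) (ab : List (Int × Int)) : Prop := n ≤ (ab.length : Int)
instance (n : Int) (x : Int) (ab : List (Int × Int)) : Decidable (Pre_solve n x ab) := by
  unfold Pre_solve; infer_instance

def pvWitness_solve : Int × Int × (List (Int × Int)) := (3, 5, [(1, 2), (0, 1), (4, 0)])

def Spec_solve (n : Int) (x : Int) (ab : List (Int × Int)) (out : Int) : Prop := out = solve_alt n x ab
instance (n : Int) (x : Int) (ab : List (Int × Int)) (out : Int) : Decidable (Spec_solve n x ab out) := by
  unfold Spec_solve; infer_instance

-- ===== CLAIM =====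
def Claim_equal_solve : Prop := ∀ (n : Int) (x : Int) (ab : List (Int × Int)),
  Dom_solve n x ab → Pre_solve n x ab → Spec_solve n x ab (solve n x ab)

-- ===== LEMMAS AND PROOFS =====

-- A's while loop over a list of length = n returns pre.length + length of the ≤-x prefix of the rest.
theorem solveLoopA_eq (x : Int) : ∀ (suf pre : List Int),
    solveLoopA (pre ++ suf) x ((pre.length : Int) + suf.length) (pre.length) =
      (pre.length : Int) + ((suf.takeWhile (fun v => v ≤ x)).length : Int) := by
  intro suf
  induction suf with
  | nil => intro pre; simp [solveLoopA]
  | cons v rest ih =>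
    intro pre
    rw [solveLoopA]
    have hlt : (pre.length : Int) < (pre.length : Int) + ((v :: rest).length : Int) := by
      simp
    rw [dif_pos hlt]
    have hget : PySem.List.pyGetD (pre ++ v :: rest) (pre.length : Int) 0 = v := by
      have := PySem.List.pyGetD_eq_getElem (pre ++ v :: rest) (i := (pre.length : Int)) 0
        (by positivity) (by simp)
      simpa using this
    rw [hget]
    by_cases hv : v ≤ x
    · rw [if_neg (by omega)]
      have h1 : (pre.length : Int) + 1 = ((pre ++ [v]).length : Int) := by simp
      have h2 : pre ++ v :: rest = (pre ++ [v]) ++ rest := by simp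
      have h3 : (pre.length : Int) + ((v :: rest).length : Int)
          = ((pre ++ [v]).length : Int) + (rest.length : Int) := by simp; omega
      rw [h1, h2, h3, ih (pre ++ [v])]
      simp [List.takeWhile_cons, hv]
      omega
    · rw [if_pos (by omega)]
      simp [List.takeWhile_cons, hv]

-- On a sorted (Pairwise ≤) list, the ≤-x prefix length is the ≤-x count.
theorem takeWhile_length_eq_countP (x : Int) : ∀ (c : List Int),
    c.Pairwise (· ≤ ·) →
    (c.takeWhile (fun v => v ≤ x)).length = c.countP (fun v => v ≤ x) := by
  intro c
  induction c with
  | nil => simp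
  | cons v rest ih =>
    intro hp
    rw [List.pairwise_cons] at hp
    by_cases hv : v ≤ x
    · simp [List.takeWhile_cons, List.countP_cons, hv, ih hp.2]
    · simp only [List.takeWhile_cons, decide_eq_true_eq, hv, if_false, List.countP_cons]
      have : rest.countP (fun v => decide (v ≤ x)) = 0 := by
        rw [List.countP_eq_zero]
        intro y hy
        have := hp.1 y hy
        simp; omega
      simp [hv, this]

-- the complement of the filter count: #(p ≤ x) + #(p > x) = length
theorem countP_add_filter_length (x : Int) : ∀ (xs : List (Int × Int)),
    xs.countP (fun p => 2 * p.1 + p.2 ≤ x)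
      + (xs.filter (fun p => 2 * p.1 + p.2 > x)).length = xs.length := by
  intro xs
  induction xs with
  | nil => simp
  | cons p rest ih =>
    by_cases hp : 2 * p.1 + p.2 ≤ x
    · have h2 : ¬ (2 * p.1 + p.2 > x) := by omega
      simp only [List.countP_cons, List.filter_cons, List.length_cons, gt_iff_lt] at ih ⊢
      simp [hp, h2, ← ih]
      omega
    · have h2 : 2 * p.1 + p.2 > x := by omega
      simp only [List.countP_cons, List.filter_cons, List.length_cons, gt_iff_lt] at ih ⊢
      simp [hp, h2, ← ih]
      omega

theorem map_pyGetD_take {α : Type} (ab : List α) (d : α) (m : Nat) (hm : m ≤ ab.length)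
    {β : Type} (f : α → β) :
    (PySem.List.pyRange 0 m 1).map (fun i => f (PySem.List.pyGetD ab i d)) =
      (ab.take m).map f := by
  rw [PySem.List.pyRange_one]
  simp only [Int.sub_zero, Int.toNat_natCast, List.map_map]
  apply List.ext_getElem
  · simp [min_eq_left hm]
  · intro k h1 h2
    simp only [List.getElem_map, Function.comp, List.getElem_range, zero_add,
      List.getElem_take]
    have hk : k < ab.length := by simp at h1; omega
    rw [PySem.List.pyGetD_eq_getElem ab d (by positivity) (by simpa using hk)]
    simp

-- ===== VERDICT (by name: the statement is the Claim_ definition above) =====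
theorem solve_spec : Claim_equal_solve := by
  intro n x ab _ hpre
  unfold Spec_solve solve solve_alt Pre_solve at *
  dsimp only
  by_cases hn : n ≤ 0
  · rw [PySem.List.pyRange_one_eq_nil (by omega)]
    simp only [List.foldl_nil, List.map_nil, List.sum_nil, List.filter_nil,
      List.length_nil]
    have hs : PySem.List.sorted ([] : List Int) (fun v => v) false = [] := by
      simp [PySem.List.sorted]
    rw [hs]
    have hloop : solveLoopA [] x n 0 = 0 := by
      rw [solveLoopA, dif_neg (by omega)]
    simp only [hloop, Nat.cast_zero, sub_self]
    split_ifs <;> ring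
  · rw [Int.not_le] at hn
    set m : Nat := n.toNat with hmdef
    have hmn : (m : Int) = n := by omega
    have hmlen : m ≤ ab.length := by omega
    set xs : List (Int × Int) := ab.take m with hxs
    have hxlen : xs.length = m := by simp [hxs, min_eq_left hmlen]
    -- A's a and b lists
    have ha : (PySem.List.pyRange 0 n 1).foldl
        (fun acc i => acc ++ [(PySem.List.pyGetD ab i (0, 0)).1]) []
        = xs.map Prod.fst := by
      rw [PySem.List.foldl_append_singleton_eq_map, ← hmn, map_pyGetD_take ab (0,0) m hmlen]
      simp [hxs, List.map_take]
    have hb : (PySem.List.pyRange 0 n 1).foldl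
        (fun acc i => acc ++ [(PySem.List.pyGetD ab i (0, 0)).2]) []
        = xs.map Prod.snd := by
      rw [PySem.List.foldl_append_singleton_eq_map, ← hmn, map_pyGetD_take ab (0,0) m hmlen]
      simp [hxs, List.map_take]
    rw [ha, hb]
    -- B's pts list is xs
    have hpts : (PySem.List.pyRange 0 n 1).map (fun k => PySem.List.pyGetD ab k (0, 0))
        = xs := by
      rw [← hmn]
      have h := map_pyGetD_take ab (0,0) m hmlen (f := id)
      simpa [hxs] using h
    rw [hpts]
    -- A's c list before sorting is xs.map g
    have hc : (PySem.List.pyRange 0 n 1).map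
        (fun i => 2 * PySem.List.pyGetD (xs.map Prod.fst) i 0
          + PySem.List.pyGetD (xs.map Prod.snd) i 0)
        = xs.map (fun p => 2 * p.1 + p.2) := by
      have h1 : ∀ i ∈ PySem.List.pyRange 0 n 1,
          2 * PySem.List.pyGetD (xs.map Prod.fst) i 0
            + PySem.List.pyGetD (xs.map Prod.snd) i 0
          = (PySem.List.pyGetD xs i (0, 0)).1 * 2 + (PySem.List.pyGetD xs i (0, 0)).2 := by
        intro i hi
        rw [PySem.List.mem_pyRange_one] at hi
        have hilen : i.toNat < xs.length := by omega
        rw [PySem.List.pyGetD_eq_getElem (xs.map Prod.fst) 0 hi.1 (by simp [hxlen]; omega),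
            PySem.List.pyGetD_eq_getElem (xs.map Prod.snd) 0 hi.1 (by simp [hxlen]; omega),
            PySem.List.pyGetD_eq_getElem xs (0,0) hi.1 (by omega)]
        simp; ring
      rw [List.map_congr_left h1, ← hmn]
      rw [show PySem.List.pyRange 0 (m : Int) 1
            = PySem.List.pyRange 0 ((xs.length : Int)) 1 by rw [hxlen],
          show ((xs.length : Int)) = ((xs.length : Nat) : Int) from rfl,
          map_pyGetD_take xs (0,0) xs.length le_rfl (f := fun p => p.1 * 2 + p.2)]
      simp only [List.take_length]
      apply List.map_congr_left; intro p _; ring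
    rw [hc]
    have hsumf : (xs.map (fun p => p.1)).sum = (xs.map Prod.fst).sum := rfl
    have hsumt : (xs.map (fun p => p.2)).sum = (xs.map Prod.snd).sum := rfl
    rw [hsumf, hsumt]
    -- B's light = count of 2a+b ≤ x
    set cnt : Int := (xs.countP (fun p => 2 * p.1 + p.2 ≤ x) : Int) with hcnt
    have hlight : (xs.length : Int) - ((xs.filter (fun p => 2 * p.1 + p.2 > x)).length : Int)
        = cnt := by
      have := countP_add_filter_length x xs
      omega
    rw [hlight]
    by_cases hsx : (xs.map Prod.fst).sum ≤ x
    · simp [hsx]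
    · simp only [hsx, if_false]
      set cs := PySem.List.sorted (xs.map fun p => 2 * p.1 + p.2) (fun v => v) false with hcs
      have hcslen : (cs.length : Int) = n := by
        rw [hcs, PySem.List.length_sorted]; simp [hxlen, hmn]
      have hloop : solveLoopA cs x n 0 = cnt := by
        have h0 := solveLoopA_eq x cs []
        simp only [List.nil_append, List.length_nil, Nat.cast_zero, zero_add] at h0
        rw [← hcslen, h0]
        have hpair : cs.Pairwise (· ≤ ·) := by
          have := PySem.List.sorted_pairwise (xs := xs.map fun p => 2 * p.1 + p.2)
            (key := fun v => v)
          simpa [hcs] using this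
        rw [takeWhile_length_eq_countP x cs hpair, hcnt]
        have hperm : cs.Perm (xs.map fun p => 2 * p.1 + p.2) := by
          rw [hcs]; exact PySem.List.sorted_perm _ _ _
        rw [hperm.countP_eq, List.countP_map]
        congr 1
      rw [hloop]
      by_cases hin : cnt = n
      · simp [hin]
      · simp only [hin, if_false]
        ring
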